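-- pv_equiv track=rewrite | github.com/Naumenko-KM/Yandex_Algorithms | 4H - Расшифровка писменности Майя.py | is_word_in_syms
-- ===== SOURCE A (Python) =====
-- def is_word_in_syms(word_dict, syms_dict):
--     cnt = 0
--     for letter in word_dict:
--         if letter in syms_dict.keys():
--             if word_dict[letter] == syms_dict[letter]:
--                 cnt += 1
--     if cnt == len(word_dict):
--         return 1
--     else:
--         return 0
-- ===== SOURCE B (Python) =====
-- def is_word_in_syms(word_dict, syms_dict):
--     # Sort both dicts' items by key and walk them with two pointers:
--     # every word item must be met, in key order, in the symbol list.
--     w = sorted(word_dict.items(), key=lambda kv: kv[0])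
--     s = sorted(syms_dict.items(), key=lambda kv: kv[0])
--     i = j = 0
--     while i < len(w):
--         if j == len(s):
--             return 0
--         if s[j][0] < w[i][0]:
--             j += 1
--         elif s[j] == w[i]:
--             i += 1
--             j += 1
--         else:
--             return 0
--     return 1
-- ===== Notes on version B (the rewrite author's own statement) =====
-- stated objective: alternative
-- what changed: Replaces the per-key membership-and-value counting loop with a sort-then-merge: both item lists are sorted by key and a two-pointer scan checks that every word item occurs in the symbol list, with early exit on the first mismatch.
import Mathlib
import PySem

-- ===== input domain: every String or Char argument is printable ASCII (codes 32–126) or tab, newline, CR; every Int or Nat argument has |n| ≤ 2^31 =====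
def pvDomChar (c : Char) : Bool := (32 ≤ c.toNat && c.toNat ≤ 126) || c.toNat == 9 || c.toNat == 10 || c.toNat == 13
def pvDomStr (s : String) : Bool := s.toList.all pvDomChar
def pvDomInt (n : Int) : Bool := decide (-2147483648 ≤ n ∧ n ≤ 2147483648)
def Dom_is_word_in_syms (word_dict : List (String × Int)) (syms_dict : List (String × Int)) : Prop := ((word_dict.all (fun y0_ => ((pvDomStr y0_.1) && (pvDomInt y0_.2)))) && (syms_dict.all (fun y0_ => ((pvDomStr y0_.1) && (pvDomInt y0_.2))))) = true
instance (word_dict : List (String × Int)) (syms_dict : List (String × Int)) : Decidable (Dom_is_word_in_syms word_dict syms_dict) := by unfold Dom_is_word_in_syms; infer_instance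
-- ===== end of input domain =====

-- B replaces A's per-key membership-and-value counting loop by sorting both
-- item lists by key and checking containment with a single two-pointer merge scan.

-- ===== PORT A =====
def is_word_in_syms (word_dict : List (String × Int)) (syms_dict : List (String × Int)) : Int :=
  let wd := PySem.Dict.ofList word_dict
  let sd := PySem.Dict.ofList syms_dict
  -- cnt = 0; for letter in word_dict: if letter in syms_dict.keys(): if word_dict[letter] == syms_dict[letter]: cnt += 1
  let cnt : Int := wd.keys.foldl (fun cnt letter =>
    if sd.contains letter then
      (if wd.getD letter 0 = sd.getD letter 0 then cnt + 1 else cnt)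
    else cnt) 0
  if cnt = (wd.size : Int) then 1 else 0

-- ===== PORT B =====
-- the two-pointer merge scan of Source B, as structural recursion on the symbol list
def pvMergeSub : List (String × Int) → List (String × Int) → Bool
  | [], _ => true
  | _ :: _, [] => false
  | (k, v) :: w, (k', v') :: s =>
      if k' < k then pvMergeSub ((k, v) :: w) s
      else if k' = k ∧ v' = v then pvMergeSub w s
      else false

def is_word_in_syms_alt (word_dict : List (String × Int)) (syms_dict : List (String × Int)) : Int :=
  let wd := PySem.Dict.ofList word_dict
  let sd := PySem.Dict.ofList syms_dict
  let w := PySem.List.sorted wd.items (fun kv => kv.1) false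
  let s := PySem.List.sorted sd.items (fun kv => kv.1) false
  if pvMergeSub w s then 1 else 0

-- ===== PRECONDITION & SPEC =====
def Spec_is_word_in_syms (word_dict : List (String × Int)) (syms_dict : List (String × Int)) (out : Int) : Prop := out = is_word_in_syms_alt word_dict syms_dict
instance (word_dict : List (String × Int)) (syms_dict : List (String × Int)) (out : Int) : Decidable (Spec_is_word_in_syms word_dict syms_dict out) := by unfold Spec_is_word_in_syms; infer_instance

-- ===== CLAIM (what is proved, stated in full; the proofs are below) =====
def Claim_equal_is_word_in_syms : Prop := ∀ (word_dict : List (String × Int)) (syms_dict : List (String × Int)), Dom_is_word_in_syms word_dict syms_dict → Spec_is_word_in_syms word_dict syms_dict (is_word_in_syms word_dict syms_dict)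

-- ===== LEMMAS AND PROOFS =====

/-- A counting foldl is the length of the filtered list. -/
lemma count_foldl {α : Type} (q : α → Bool) (l : List α) (c : Int) :
    l.foldl (fun c x => if q x then c + 1 else c) c = c + ((l.filter q).length : Int) := by
  induction l generalizing c with
  | nil => simp
  | cons x xs ih =>
    by_cases h : q x <;>
      simp [List.foldl, h, ih, Int.add_comm, Int.add_left_comm]

/-- A's per-key test equals membership of the corresponding item in sd.items. -/
lemma key_test_iff (wd sd : PySem.Dict String Int)
    (hw : wd.keys.Nodup) (hs : sd.keys.Nodup)
    (k : String) (v : Int) (hk : (k, v) ∈ wd.items) :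
    ((sd.contains k && decide (wd.getD k 0 = sd.getD k 0)) = true) ↔ (k, v) ∈ sd.items := by
  have hwv : wd.getD k 0 = v := PySem.Dict.getD_of_mem_items wd hk hw 0
  rw [← PySem.Dict.get?_eq_some_iff_mem_items sd k v hs]
  constructor
  · intro h
    simp only [Bool.and_eq_true, decide_eq_true_eq] at h
    obtain ⟨hc, hv⟩ := h
    rw [PySem.Dict.contains_iff_mem_keys] at hc
    cases hget : sd.get? k with
    | none => exact absurd hc ((PySem.Dict.get?_eq_none_iff_not_mem_keys sd k).1 hget)
    | some w =>
      have hgd : sd.getD k 0 = w := PySem.Dict.getD_of_get?_eq_some sd 0 hget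
      rw [hwv, hgd] at hv
      rw [hv]
  · intro h
    have hv : sd.getD k 0 = v := PySem.Dict.getD_of_get?_eq_some sd 0 h
    have hc : sd.contains k = true := by
      rw [PySem.Dict.contains_iff_mem_keys]
      by_contra hn
      rw [(PySem.Dict.get?_eq_none_iff_not_mem_keys sd k).2 hn] at h
      simp at h
    simp [hc, hwv, hv]

/-- A returns 1 iff every item of wd occurs among sd's items. -/
lemma portA_eq_one_iff (word_dict syms_dict : List (String × Int)) :
    is_word_in_syms word_dict syms_dict
      = (if ∀ p ∈ (PySem.Dict.ofList word_dict).items, p ∈ (PySem.Dict.ofList syms_dict).items then (1 : Int) else 0) := by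
  unfold is_word_in_syms
  set wd := PySem.Dict.ofList word_dict with hwd
  set sd := PySem.Dict.ofList syms_dict with hsd
  have hw : wd.keys.Nodup := PySem.Dict.nodup_keys_ofList word_dict
  have hs : sd.keys.Nodup := PySem.Dict.nodup_keys_ofList syms_dict
  simp only []
  have hfold : wd.keys.foldl (fun cnt letter =>
      if sd.contains letter then
        (if wd.getD letter 0 = sd.getD letter 0 then cnt + 1 else cnt)
      else cnt) (0 : Int)
      = wd.keys.foldl (fun cnt letter =>
        if (sd.contains letter && decide (wd.getD letter 0 = sd.getD letter 0)) then cnt + 1 else cnt) 0 := by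
    apply PySem.List.foldl_congr_mem
    intro c k _
    by_cases h1 : sd.contains k <;> by_cases h2 : wd.getD k 0 = sd.getD k 0 <;> simp [h1, h2]
  rw [hfold, count_foldl]
  have hlenkeys : wd.size = wd.keys.length := by
    simp [PySem.Dict.size, PySem.Dict.keys]
  by_cases hall : ∀ p ∈ wd.items, p ∈ sd.items
  · have hfull : (wd.keys.filter (fun k => sd.contains k && decide (wd.getD k 0 = sd.getD k 0))) = wd.keys := by
      rw [List.filter_eq_self]
      intro k hk
      have hkit : (k, wd.getD k 0) ∈ wd.items := by
        rw [← PySem.Dict.get?_eq_some_iff_mem_items wd k (wd.getD k 0) hw]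
        rcases hget : wd.get? k with _ | w
        · exact absurd hk ((PySem.Dict.get?_eq_none_iff_not_mem_keys wd k).1 hget)
        · rw [PySem.Dict.getD_of_get?_eq_some wd 0 hget]
      exact (key_test_iff wd sd hw hs k (wd.getD k 0) hkit).2 (hall _ hkit)
    rw [if_pos hall, hfull, hlenkeys]
    simp
  · rw [if_neg hall]
    simp only [not_forall, exists_prop] at hall
    obtain ⟨⟨k, v⟩, hkmem, hkfail⟩ := hall
    have hkfail' : ¬ ((sd.contains k && decide (wd.getD k 0 = sd.getD k 0)) = true) := by
      intro h
      exact hkfail ((key_test_iff wd sd hw hs k v hkmem).1 h)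
    have hkkeys : k ∈ wd.keys := PySem.Dict.mem_keys_of_mem_items wd hkmem
    have hlt : (wd.keys.filter (fun k => sd.contains k && decide (wd.getD k 0 = sd.getD k 0))).length < wd.keys.length := by
      apply List.length_filter_lt_length_iff_exists.2
      exact ⟨k, hkkeys, by simpa using hkfail'⟩
    have hne : (0 : Int) + ((wd.keys.filter (fun k => sd.contains k && decide (wd.getD k 0 = sd.getD k 0))).length : Int) ≠ (wd.size : Int) := by
      rw [hlenkeys]; omega
    rw [if_neg hne]

/-- Merge-scan correctness: on key-strictly-increasing lists it decides containment. -/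
lemma pvMergeSub_iff (w s : List (String × Int))
    (hw : w.Pairwise (fun a b => a.1 < b.1)) (hs : s.Pairwise (fun a b => a.1 < b.1)) :
    pvMergeSub w s = true ↔ ∀ p ∈ w, p ∈ s := by
  induction w, s using pvMergeSub.induct with
  | case1 s => simp [pvMergeSub]
  | case2 x w =>
    simp only [pvMergeSub, Bool.false_eq_true, false_iff, not_forall]
    exact ⟨x, List.mem_cons_self, by simp⟩
  | case3 k v w k' v' s hlt ih =>
    rw [List.pairwise_cons] at hs
    have ih' := ih hw hs.2
    simp only [pvMergeSub, if_pos hlt]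
    rw [ih']
    constructor
    · intro h p hp
      exact List.mem_cons_of_mem _ (h p hp)
    · intro h p hp
      rcases List.mem_cons.1 (h p hp) with h1 | h1
      · exfalso
        have hk : k ≤ p.1 := by
          rcases List.mem_cons.1 hp with h2 | h2
          · simp [h2]
          · exact le_of_lt ((List.pairwise_cons.1 hw).1 p h2)
        have hk' : k ≤ k' := by simpa [h1] using hk
        exact absurd (lt_of_le_of_lt hk' hlt) (lt_irrefl k)
      · exact h1
  | case4 k v w k' v' s hlt heq ih =>
    obtain ⟨rfl, rfl⟩ := heq
    rw [List.pairwise_cons] at hw hs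
    have ih' := ih hw.2 hs.2
    simp only [pvMergeSub, if_neg hlt]
    rw [if_pos (⟨trivial, trivial⟩ : True ∧ True), ih']
    constructor
    · intro h p hp
      rcases List.mem_cons.1 hp with rfl | hp'
      · exact List.mem_cons_self
      · exact List.mem_cons_of_mem _ (h p hp')
    · intro h p hp
      rcases List.mem_cons.1 (h p (List.mem_cons_of_mem _ hp)) with h1 | h1
      · exfalso
        have : k' < p.1 := hw.1 p hp
        rw [h1] at this
        exact lt_irrefl _ this
      · exact h1
  | case5 k v w k' v' s hlt hne =>
    simp only [pvMergeSub, if_neg hlt, if_neg hne]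
    rw [List.pairwise_cons] at hs
    constructor
    · intro h; exact absurd h (by simp)
    · intro h
      exfalso
      have hm := h (k, v) List.mem_cons_self
      rcases List.mem_cons.1 hm with h1 | h1
      · injection h1 with e1 e2
        exact hne ⟨e1.symm, e2.symm⟩
      · have h2 : k' < k := hs.1 (k, v) h1
        exact hlt h2

/-- The key-sorted items of a dict are strictly increasing in the key. -/
lemma sorted_items_pairwise (d : PySem.Dict String Int) (hnd : d.keys.Nodup) :
    (PySem.List.sorted d.items (fun kv => kv.1) false).Pairwise (fun a b => a.1 < b.1) := by
  have hle : (PySem.List.sorted d.items (fun kv => kv.1) false).Pairwise (fun a b => a.1 ≤ b.1) :=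
    PySem.List.sorted_pairwise d.items (fun kv => kv.1)
  have hperm : (PySem.List.sorted d.items (fun kv => kv.1) false).Perm d.items :=
    PySem.List.sorted_perm d.items (fun kv => kv.1) false
  have hkeys : d.items.map (fun kv => kv.1) = d.keys := by
    simp [PySem.Dict.keys]
  have hnd' : ((PySem.List.sorted d.items (fun kv => kv.1) false).map (fun kv => kv.1)).Nodup := by
    apply (hperm.map (fun kv => kv.1)).nodup_iff.2
    rw [hkeys]; exact hnd
  have hne : (PySem.List.sorted d.items (fun kv => kv.1) false).Pairwise (fun a b => a.1 ≠ b.1) :=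
    List.pairwise_map.1 hnd'
  exact (hle.and hne).imp (fun h => lt_of_le_of_ne h.1 h.2)

lemma main_equiv (word_dict syms_dict : List (String × Int)) :
    is_word_in_syms word_dict syms_dict = is_word_in_syms_alt word_dict syms_dict := by
  rw [portA_eq_one_iff]
  unfold is_word_in_syms_alt
  set wd := PySem.Dict.ofList word_dict with hwd
  set sd := PySem.Dict.ofList syms_dict with hsd
  have hw : wd.keys.Nodup := PySem.Dict.nodup_keys_ofList word_dict
  have hs : sd.keys.Nodup := PySem.Dict.nodup_keys_ofList syms_dict
  simp only []
  have hmerge := pvMergeSub_iff _ _ (sorted_items_pairwise wd hw) (sorted_items_pairwise sd hs)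
  have hmemw : ∀ p, p ∈ PySem.List.sorted wd.items (fun kv => kv.1) false ↔ p ∈ wd.items := by
    intro p; exact PySem.List.mem_sorted wd.items (fun kv => kv.1) false p
  have hmems : ∀ p, p ∈ PySem.List.sorted sd.items (fun kv => kv.1) false ↔ p ∈ sd.items := by
    intro p; exact PySem.List.mem_sorted sd.items (fun kv => kv.1) false p
  by_cases hall : ∀ p ∈ wd.items, p ∈ sd.items
  · rw [if_pos hall, if_pos (hmerge.2 (fun p hp => (hmems p).2 (hall p ((hmemw p).1 hp))))]
  · rw [if_neg hall, if_neg]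
    intro h
    exact hall (fun p hp => (hmems p).1 (hmerge.1 h p ((hmemw p).2 hp)))

-- ===== VERDICT (by name: the statement is the Claim_ definition above) =====
theorem is_word_in_syms_spec : Claim_equal_is_word_in_syms := by
  intro word_dict syms_dict _
  unfold Spec_is_word_in_syms
  exact main_equiv word_dict syms_dict
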